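-- pv_equiv track=rewrite | github.com/Dong-Kyu-Lee7/programmers | 프로그래머스/0/120815. 피자 나눠 먹기 （2）/피자 나눠 먹기 （2）.py | solution
-- ===== SOURCE A (Python) =====
-- def solution(n):
--     result = 0
--     p = 6
--
--     for x in range(1, p * n +1):
--         if (p * x) % n == 0:
--             result = x
--             break
--     return result
-- ===== SOURCE B (Python) =====
-- def solution(n):
--     # gcd(6, n) for positive n is the largest of 6, 3, 2, 1 that divides n;
--     # the answer is n // gcd(6, n). Scan the four divisors largest-first.
--     for d in (6, 3, 2, 1):
--         if d <= n and n % d == 0: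
--             return n // d
--     return 0
-- ===== Notes on version B (the rewrite author's own statement) =====
-- stated objective: faster
-- what changed: A scans x = 1..6n testing 6x % n == 0 until the first hit; B returns n // d for the largest d in (6,3,2,1) that divides n (d <= n), i.e. n // gcd(6,n), with a constant four-candidate scan instead of an O(n) search.
import Mathlib
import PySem

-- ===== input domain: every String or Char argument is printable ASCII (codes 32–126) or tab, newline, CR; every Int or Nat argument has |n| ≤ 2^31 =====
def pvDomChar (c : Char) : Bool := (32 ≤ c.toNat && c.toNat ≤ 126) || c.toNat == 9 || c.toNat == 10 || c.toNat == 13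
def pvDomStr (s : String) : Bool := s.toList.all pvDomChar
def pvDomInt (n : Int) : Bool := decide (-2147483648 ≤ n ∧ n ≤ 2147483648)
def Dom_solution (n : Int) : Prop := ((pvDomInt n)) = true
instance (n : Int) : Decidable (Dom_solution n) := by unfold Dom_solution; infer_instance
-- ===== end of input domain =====

-- B replaces A's O(n) scan for the first x with 6x % n == 0 by the constant-time
-- largest-divisor-of-6 table, returning n // gcd(6, n); objective: faster (asymptotic).

-- ===== PORT A =====
-- the for-loop with break: first x in the range with (6*x) % n == 0, else the sentinel 0
def solutionLoop (n : Int) : List Int → Int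
  | [] => 0
  | x :: rest => if PySem.Int.mod (6 * x) n = 0 then x else solutionLoop n rest

def solution (n : Int) : Int :=
  solutionLoop n (PySem.List.pyRange 1 (6 * n + 1) 1)

-- ===== PORT B =====
-- first d in (6, 3, 2, 1) with d <= n and n % d == 0, returning n // d; else 0
def solutionAltGo (n : Int) : List Int → Int
  | [] => 0
  | d :: rest =>
      if d ≤ n ∧ PySem.Int.mod n d = 0 then PySem.Int.floordiv n d
      else solutionAltGo n rest

def solution_alt (n : Int) : Int := solutionAltGo n [6, 3, 2, 1]

-- ===== PRECONDITION & SPEC =====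
def Spec_solution (n : Int) (out : Int) : Prop := out = solution_alt n
instance (n : Int) (out : Int) : Decidable (Spec_solution n out) := by unfold Spec_solution; infer_instance

-- ===== CLAIM (what is proved, stated in full; the proofs are below) =====
def Claim_equal_solution : Prop := ∀ (n : Int), Dom_solution n → Spec_solution n (solution n)

-- ===== LEMMAS AND PROOFS =====

lemma loopA_first (n b x0 : Int) (hn : 0 < n) (hx : (6 * x0) % n = 0) (hb : x0 < b) :
    ∀ (k : Nat) (a : Int), (x0 - a).toNat = k → a ≤ x0 →
      (∀ x, a ≤ x → x < x0 → ¬ ((6 * x) % n = 0)) →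
      solutionLoop n (PySem.List.pyRange a b 1) = x0 := by
  intro k
  induction k with
  | zero =>
      intro a hk ha _
      have hax : a = x0 := by omega
      subst hax
      rw [PySem.List.pyRange_one_cons (by omega)]
      simp [solutionLoop, PySem.Int.mod_eq_emod_of_pos hn, hx]
  | succ k ih =>
      intro a hk ha hmin
      have hax : a < x0 := by omega
      rw [PySem.List.pyRange_one_cons (by omega)]
      have hfail : ¬ ((6 * a) % n = 0) := hmin a le_rfl hax
      simp only [solutionLoop, PySem.Int.mod_eq_emod_of_pos hn, if_neg hfail]
      exact ih (a + 1) (by omega) (by omega) (fun x h1 h2 => hmin x (by omega) h2)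

lemma A_eq (n x0 : Int) (hn : 0 < n) (hx1 : 1 ≤ x0) (hx2 : x0 ≤ n)
    (hhit : (6 * x0) % n = 0)
    (hmin : ∀ x, 1 ≤ x → x < x0 → ¬ ((6 * x) % n = 0)) :
    solution n = x0 := by
  unfold solution
  exact loopA_first n (6 * n + 1) x0 hn hhit (by omega)
    (x0 - 1).toNat 1 (by omega) hx1 hmin

lemma dvd_cancel_prime (p n m : Int) (hp : Prime p) (hnp : ¬ p ∣ n) (h : n ∣ p * m) :
    n ∣ m := by
  have hc : IsCoprime n p := ((Prime.coprime_iff_not_dvd hp).mpr hnp).symm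
  exact hc.dvd_of_dvd_mul_left h

lemma cancel2 (n x : Int) (h2 : ¬ (2:Int) ∣ n) (hd : n ∣ 6 * x) : n ∣ 3 * x := by
  apply dvd_cancel_prime 2 n (3 * x) Int.prime_two h2
  have e : (2:Int) * (3 * x) = 6 * x := by ring
  rwa [e]

lemma cancel3 (n m : Int) (h3 : ¬ (3:Int) ∣ n) (hd : n ∣ 3 * m) : n ∣ m :=
  dvd_cancel_prime 3 n m Int.prime_three h3 hd

-- ===== VERDICT (by name: the statement is the Claim_ definition above) =====
theorem solution_spec : Claim_equal_solution := by
  intro n _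
  unfold Spec_solution
  by_cases hn : n ≤ 0
  · -- empty range on A's side, no divisor d ≤ n on B's side: both return 0
    have hA : solution n = 0 := by
      unfold solution
      rw [PySem.List.pyRange_one_eq_nil (by omega)]
      rfl
    have hB : solution_alt n = 0 := by
      simp only [solution_alt, solutionAltGo]
      rw [if_neg (by rintro ⟨h, -⟩; omega), if_neg (by rintro ⟨h, -⟩; omega),
          if_neg (by rintro ⟨h, -⟩; omega), if_neg (by rintro ⟨h, -⟩; omega)]
    rw [hA, hB]
  · push_neg at hn
    have hr : n % 6 = 0 ∨ n % 6 = 1 ∨ n % 6 = 2 ∨ n % 6 = 3 ∨ n % 6 = 4 ∨ n % 6 = 5 := by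
      omega
    rcases hr with hr | hr | hr | hr | hr | hr
    · -- 6 ∣ n : both sides give n / 6
      have hA : solution n = n / 6 := by
        apply A_eq n (n / 6) hn (by omega) (by omega)
        · have e : 6 * (n / 6) = n := by omega
          rw [e, Int.emod_self]
        · intro x h1 h2 hc
          have hd : n ∣ 6 * x := Int.dvd_of_emod_eq_zero hc
          have := Int.le_of_dvd (by omega) hd
          omega
      have hB : solution_alt n = n / 6 := by
        simp only [solution_alt, solutionAltGo]
        rw [if_pos ⟨by omega, by rw [PySem.Int.mod_eq_emod_of_pos (by norm_num)]; omega⟩,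
            PySem.Int.floordiv_eq_ediv_of_pos (by norm_num)]
      rw [hA, hB]
    · -- n coprime to 6 : both sides give n
      have hA : solution n = n := by
        apply A_eq n n hn (by omega) (by omega)
        · exact Int.mul_emod_left 6 n
        · intro x h1 h2 hc
          have hd : n ∣ 6 * x := Int.dvd_of_emod_eq_zero hc
          have hd2 : n ∣ 3 * x := cancel2 n x (by omega) hd
          have hd3 : n ∣ x := cancel3 n x (by omega) hd2
          have := Int.le_of_dvd (by omega) hd3
          omega
      have hB : solution_alt n = n := by
        simp only [solution_alt, solutionAltGo]
        rw [if_neg (by rintro ⟨-, h⟩; rw [PySem.Int.mod_eq_emod_of_pos (by norm_num)] at h; omega),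
            if_neg (by rintro ⟨-, h⟩; rw [PySem.Int.mod_eq_emod_of_pos (by norm_num)] at h; omega),
            if_neg (by rintro ⟨-, h⟩; rw [PySem.Int.mod_eq_emod_of_pos (by norm_num)] at h; omega),
            if_pos ⟨by omega, by rw [PySem.Int.mod_eq_emod_of_pos (by norm_num)]; omega⟩,
            PySem.Int.floordiv_eq_ediv_of_pos (by norm_num)]
        omega
      rw [hA, hB]
    · -- 2 ∣ n, ¬ 3 ∣ n : both sides give n / 2
      have hA : solution n = n / 2 := by
        apply A_eq n (n / 2) hn (by omega) (by omega)
        · have e : 6 * (n / 2) = 3 * n := by omega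
          rw [e]
          exact Int.mul_emod_left 3 n
        · intro x h1 h2 hc
          have hd : n ∣ 6 * x := Int.dvd_of_emod_eq_zero hc
          have e : (3:Int) * (2 * x) = 6 * x := by ring
          have hd2 : n ∣ 2 * x := cancel3 n (2 * x) (by omega) (by rwa [e])
          have := Int.le_of_dvd (by omega) hd2
          omega
      have hB : solution_alt n = n / 2 := by
        simp only [solution_alt, solutionAltGo]
        rw [if_neg (by rintro ⟨-, h⟩; rw [PySem.Int.mod_eq_emod_of_pos (by norm_num)] at h; omega),
            if_neg (by rintro ⟨-, h⟩; rw [PySem.Int.mod_eq_emod_of_pos (by norm_num)] at h; omega),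
            if_pos ⟨by omega, by rw [PySem.Int.mod_eq_emod_of_pos (by norm_num)]; omega⟩,
            PySem.Int.floordiv_eq_ediv_of_pos (by norm_num)]
      rw [hA, hB]
    · -- 3 ∣ n, n odd : both sides give n / 3
      have hA : solution n = n / 3 := by
        apply A_eq n (n / 3) hn (by omega) (by omega)
        · have e : 6 * (n / 3) = 2 * n := by omega
          rw [e]
          exact Int.mul_emod_left 2 n
        · intro x h1 h2 hc
          have hd : n ∣ 6 * x := Int.dvd_of_emod_eq_zero hc
          have hd2 : n ∣ 3 * x := cancel2 n x (by omega) hd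
          have := Int.le_of_dvd (by omega) hd2
          omega
      have hB : solution_alt n = n / 3 := by
        simp only [solution_alt, solutionAltGo]
        rw [if_neg (by rintro ⟨-, h⟩; rw [PySem.Int.mod_eq_emod_of_pos (by norm_num)] at h; omega),
            if_pos ⟨by omega, by rw [PySem.Int.mod_eq_emod_of_pos (by norm_num)]; omega⟩,
            PySem.Int.floordiv_eq_ediv_of_pos (by norm_num)]
      rw [hA, hB]
    · -- 2 ∣ n, ¬ 3 ∣ n : both sides give n / 2
      have hA : solution n = n / 2 := by
        apply A_eq n (n / 2) hn (by omega) (by omega)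
        · have e : 6 * (n / 2) = 3 * n := by omega
          rw [e]
          exact Int.mul_emod_left 3 n
        · intro x h1 h2 hc
          have hd : n ∣ 6 * x := Int.dvd_of_emod_eq_zero hc
          have e : (3:Int) * (2 * x) = 6 * x := by ring
          have hd2 : n ∣ 2 * x := cancel3 n (2 * x) (by omega) (by rwa [e])
          have := Int.le_of_dvd (by omega) hd2
          omega
      have hB : solution_alt n = n / 2 := by
        simp only [solution_alt, solutionAltGo]
        rw [if_neg (by rintro ⟨-, h⟩; rw [PySem.Int.mod_eq_emod_of_pos (by norm_num)] at h; omega),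
            if_neg (by rintro ⟨-, h⟩; rw [PySem.Int.mod_eq_emod_of_pos (by norm_num)] at h; omega),
            if_pos ⟨by omega, by rw [PySem.Int.mod_eq_emod_of_pos (by norm_num)]; omega⟩,
            PySem.Int.floordiv_eq_ediv_of_pos (by norm_num)]
      rw [hA, hB]
    · -- n coprime to 6 : both sides give n
      have hA : solution n = n := by
        apply A_eq n n hn (by omega) (by omega)
        · exact Int.mul_emod_left 6 n
        · intro x h1 h2 hc
          have hd : n ∣ 6 * x := Int.dvd_of_emod_eq_zero hc
          have hd2 : n ∣ 3 * x := cancel2 n x (by omega) hd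
          have hd3 : n ∣ x := cancel3 n x (by omega) hd2
          have := Int.le_of_dvd (by omega) hd3
          omega
      have hB : solution_alt n = n := by
        simp only [solution_alt, solutionAltGo]
        rw [if_neg (by rintro ⟨-, h⟩; rw [PySem.Int.mod_eq_emod_of_pos (by norm_num)] at h; omega),
            if_neg (by rintro ⟨-, h⟩; rw [PySem.Int.mod_eq_emod_of_pos (by norm_num)] at h; omega),
            if_neg (by rintro ⟨-, h⟩; rw [PySem.Int.mod_eq_emod_of_pos (by norm_num)] at h; omega),
            if_pos ⟨by omega, by rw [PySem.Int.mod_eq_emod_of_pos (by norm_num)]; omega⟩,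
            PySem.Int.floordiv_eq_ediv_of_pos (by norm_num)]
        omega
      rw [hA, hB]
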